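-- pv_equiv track=rewrite | github.com/ertanturk/lzw-compression-project | src/lzw/utils.py | restore_from_difference
-- ===== SOURCE A (Python) =====
-- def restore_from_difference(diff_image: list[list[int]]) -> list[list[int]]:
--     height = len(diff_image)
--     width = len(diff_image[0])
--
--     # empty 2D list for restored image
--     restored: list[list[int]] = []
--     for _row in range(height):
--         restored.append([0] * width)
--
--     # top-left stays the same
--     restored[0][0] = diff_image[0][0]
--
--     # first row: add difference to previous pixel
--     for col in range(1, width):
--         restored[0][col] = restored[0][col - 1] + diff_image[0][col]
--
--     # first column: add difference to pixel above
--     for row in range(1, height):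
--         restored[row][0] = restored[row - 1][0] + diff_image[row][0]
--
--     # rest: add difference to previous pixel in same row
--     for row in range(1, height):
--         for col in range(1, width):
--             restored[row][col] = restored[row][col - 1] + diff_image[row][col]
--
--     return restored
-- ===== SOURCE B (Python) =====
-- def restore_from_difference(diff_image: list[list[int]]) -> list[list[int]]:
--     # Closed form per pixel: restored[r][c] is the vertical prefix sum of the
--     # first diff column through row r plus the horizontal sum of row r's
--     # diffs up to column c -- computed directly, no recurrence on restored.
--     width = len(diff_image[0])
--     return [
--         [sum(diff_image[i][0] for i in range(r + 1)) + sum(row[1:c + 1])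
--          for c in range(width)]
--         for r, row in enumerate(diff_image)
--     ]
-- ===== Notes on version B (the rewrite author's own statement) =====
-- stated objective: alternative
-- what changed: Replaces A's staged in-place recurrence over a preallocated matrix (each pixel built from a neighbouring restored pixel) by a direct per-pixel closed form: restored[r][c] is computed independently as the sum of the first diff column through row r plus the sum of row r's diffs through column c, with no intermediate restored state at all.
import Mathlib
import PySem

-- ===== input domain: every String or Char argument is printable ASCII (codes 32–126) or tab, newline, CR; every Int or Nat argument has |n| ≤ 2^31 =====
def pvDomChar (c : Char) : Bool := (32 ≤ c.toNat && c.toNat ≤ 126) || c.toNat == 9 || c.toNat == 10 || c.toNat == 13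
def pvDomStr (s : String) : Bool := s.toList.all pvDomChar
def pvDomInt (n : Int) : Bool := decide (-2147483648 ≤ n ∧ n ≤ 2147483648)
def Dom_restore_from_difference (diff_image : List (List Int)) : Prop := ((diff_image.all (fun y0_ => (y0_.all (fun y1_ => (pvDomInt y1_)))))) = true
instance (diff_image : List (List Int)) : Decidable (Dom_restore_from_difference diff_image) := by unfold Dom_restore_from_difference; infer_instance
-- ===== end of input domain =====

-- B replaces A's four staged in-place passes (a recurrence on the restored matrix) by a
-- per-pixel closed form: each output value is computed directly as a vertical prefix sum
-- of the first diff column plus a horizontal slice sum; same output on Pre_.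

-- ===== PORT A =====
-- 2D read/write helpers for A's subscripting; all indices A uses are nonnegative and,
-- under Pre_, in range (out-of-range Python raises IndexError — excluded by Pre_).
def pvGet2 (m : List (List Int)) (r c : Nat) : Int := (m.getD r []).getD c 0

def pvSet2 (m : List (List Int)) (r c : Nat) (v : Int) : List (List Int) :=
  m.set r ((m.getD r []).set c v)

def restore_from_difference (diff_image : List (List Int)) : List (List Int) :=
  let height := diff_image.length
  let width := (diff_image.headD []).length
  -- restored = [[0]*width for _ in range(height)]
  let restored := List.replicate height (List.replicate width 0)
  -- restored[0][0] = diff_image[0][0]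
  let restored := pvSet2 restored 0 0 (pvGet2 diff_image 0 0)
  -- for col in range(1, width): ...
  let restored := (List.range' 1 (width - 1)).foldl
    (fun m col => pvSet2 m 0 col (pvGet2 m 0 (col - 1) + pvGet2 diff_image 0 col)) restored
  -- for row in range(1, height): ...
  let restored := (List.range' 1 (height - 1)).foldl
    (fun m row => pvSet2 m row 0 (pvGet2 m (row - 1) 0 + pvGet2 diff_image row 0)) restored
  -- for row in range(1, height): for col in range(1, width): ...
  let restored := (List.range' 1 (height - 1)).foldl
    (fun m row => (List.range' 1 (width - 1)).foldl
      (fun m col => pvSet2 m row col (pvGet2 m row (col - 1) + pvGet2 diff_image row col)) m) restored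
  restored

-- ===== PORT B =====
def restore_from_difference_alt (diff_image : List (List Int)) : List (List Int) :=
  let width : Int := ((diff_image.headD []).length : Int)
  (PySem.List.enumerate diff_image).map (fun rr =>
    (PySem.List.pyRange 0 width 1).map (fun c =>
      -- sum(diff_image[i][0] for i in range(r + 1))   (indices in range under Pre_)
      ((PySem.List.pyRange 0 (rr.1 + 1) 1).map
          (fun i => PySem.List.pyGetD (PySem.List.pyGetD diff_image i []) 0 0)).sum
        -- + sum(row[1:c + 1])
        + (PySem.List.slice rr.2 (some 1) (some (c + 1))).sum))

-- ===== PRECONDITION & SPEC =====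
-- A raises IndexError on an empty image, an empty first row, or any row shorter than the
-- first row; exactly those inputs are excluded (rows LONGER than the first row are kept:
-- A truncates them to the first row's width and B matches that).
def Pre_restore_from_difference (diff_image : List (List Int)) : Prop :=
  diff_image ≠ [] ∧ 0 < (diff_image.headD []).length ∧
    ∀ row ∈ diff_image, (diff_image.headD []).length ≤ row.length

instance (diff_image : List (List Int)) : Decidable (Pre_restore_from_difference diff_image) := by
  unfold Pre_restore_from_difference; infer_instance

def pvWitness_restore_from_difference : List (List Int) := [[1, 2], [3, 4]]

def Spec_restore_from_difference (diff_image : List (List Int)) (out : List (List Int)) : Prop :=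
  out = restore_from_difference_alt diff_image

instance (diff_image : List (List Int)) (out : List (List Int)) : Decidable (Spec_restore_from_difference diff_image out) := by
  unfold Spec_restore_from_difference; infer_instance

-- ===== CLAIM (what is proved, stated in full; the proofs are below) =====
def Claim_equal_restore_from_difference : Prop := ∀ (diff_image : List (List Int)), Dom_restore_from_difference diff_image → Pre_restore_from_difference diff_image → Spec_restore_from_difference diff_image (restore_from_difference diff_image)

-- ===== LEMMAS AND PROOFS =====

-- prefix sums: pvScanRow s [d1,d2,...] = [s+d1, s+d1+d2, ...]
def pvScanRow (s : Int) : List Int → List Int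
  | [] => []
  | d :: rest => (s + d) :: pvScanRow (s + d) rest

-- the common functional form both ports are reduced to
def pvSpecGo (w : Nat) (s : Int) : List (List Int) → List (List Int)
  | [] => []
  | row :: rest =>
    ((s + row.getD 0 0)
      :: pvScanRow (s + row.getD 0 0) ((row.drop 1).take (w - 1)))
      :: pvSpecGo w (s + row.getD 0 0) rest

-- rows as A's first-column pass leaves them (only column 0 written)
def pvColScan (diff : List (List Int)) (s : Int) (r : Nat) : List (List Int) → List (List Int)
  | [] => []
  | L :: rest =>
    (L.set 0 (s + (diff.getD r []).getD 0 0))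
      :: pvColScan diff (s + (diff.getD r []).getD 0 0) (r + 1) rest

-- A's inner column loop on a single row
def pvRowFill (w : Nat) (diff : List (List Int)) (r : Nat) (L : List Int) : List Int :=
  (List.range' 1 (w - 1)).foldl
    (fun L col => L.set col (L.getD (col - 1) 0 + (diff.getD r []).getD col 0)) L

def pvRowMap (w : Nat) (diff : List (List Int)) (r : Nat) : List (List Int) → List (List Int)
  | [] => []
  | L :: rest => pvRowFill w diff r L :: pvRowMap w diff (r + 1) rest

theorem pvColScan_length (diff : List (List Int)) (rows : List (List Int)) :
    ∀ (s : Int) (r : Nat), (pvColScan diff s r rows).length = rows.length := by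
  induction rows with
  | nil => intro s r; rfl
  | cons L rest ih => intro s r; simp [pvColScan, ih]

theorem pv_getD_at_len {α : Type} (xs ys : List α) (y d0 : α) :
    (xs ++ y :: ys).getD xs.length d0 = y := by simp [List.getD]

theorem pv_set_at_len {α : Type} (xs ys : List α) (y v : α) :
    (xs ++ y :: ys).set xs.length v = xs ++ v :: ys := by simp

theorem pv_append_norm {α : Type} (xs : List α) (y : α) (ys : List α) :
    (xs ++ [y]) ++ ys = xs ++ y :: ys := by simp

-- the vertical prefix sum S a = sum of the first a entries of diff's column 0
def pvColSum (diff : List (List Int)) (a : Nat) : Int :=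
  ((List.range a).map (fun i => (diff.getD i []).getD 0 0)).sum

-- pvScanRow as a closed form of prefix sums
theorem pv_scanRow_map (ds : List Int) : ∀ (s : Int),
    pvScanRow s ds = (List.range ds.length).map (fun j => s + (ds.take (j + 1)).sum) := by
  induction ds with
  | nil => intro s; simp [pvScanRow]
  | cons d rest ih =>
    intro s
    simp only [pvScanRow, List.length_cons, List.range_succ_eq_map, List.map_cons,
      List.map_map]
    refine List.cons_eq_cons.mpr ⟨by simp, ?_⟩
    rw [ih (s + d)]
    apply List.map_congr_left
    intro j _
    simp [List.take_succ_cons, add_assoc]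

-- one output row: s followed by the scan of the (w-1)-truncated diffs equals the closed form
theorem pv_row_closed (w : Nat) (hw : 0 < w) (s : Int) (ds : List Int) (hlen : w - 1 ≤ ds.length) :
    s :: pvScanRow s (ds.take (w - 1))
      = (List.range w).map (fun c => s + (ds.take c).sum) := by
  obtain ⟨k, hk⟩ : ∃ k, w = k + 1 := ⟨w - 1, by omega⟩
  subst hk
  simp only [List.range_succ_eq_map, List.map_cons, List.map_map, Nat.add_sub_cancel] at *
  refine List.cons_eq_cons.mpr ⟨by simp, ?_⟩
  rw [pv_scanRow_map]
  have hl : (ds.take k).length = k := by simp; omega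
  rw [hl]
  apply List.map_congr_left
  intro j hj
  simp only [List.mem_range] at hj
  simp [List.take_take, Nat.min_eq_left (by omega : j + 1 ≤ k)]

-- B's enumerate-map equals pvSpecGo, tracked by the start index a
theorem pv_B_go (diff : List (List Int)) (w : Nat) (hw : 0 < w) (rest : List (List Int)) :
    ∀ (a : Nat), diff.drop a = rest → (∀ L ∈ rest, w ≤ L.length) →
    (PySem.List.enumerate rest (a : Int)).map (fun rr =>
      (PySem.List.pyRange 0 (w : Int) 1).map (fun c =>
        ((PySem.List.pyRange 0 (rr.1 + 1) 1).map
            (fun i => PySem.List.pyGetD (PySem.List.pyGetD diff i []) 0 0)).sum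
          + (PySem.List.slice rr.2 (some 1) (some (c + 1))).sum))
      = pvSpecGo w (pvColSum diff a) rest := by
  induction rest with
  | nil => intro a _ _; simp [PySem.List.enumerate, pvSpecGo]
  | cons row rest' ih =>
    intro a hdrop hlen
    have h1 : diff[a]? = some row := by
      rw [← List.head?_drop, hdrop]; rfl
    have hga : diff.getD a [] = row := by simp [List.getD, h1]
    have hdrop' : diff.drop (a + 1) = rest' := by
      have : diff.drop (a + 1) = (diff.drop a).drop 1 := by rw [List.drop_drop]
      rw [this, hdrop]; rfl
    have hrow : w ≤ row.length := hlen row (by simp)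
    rw [PySem.List.enumerate_cons, List.map_cons]
    -- the head row
    have hcol : ((PySem.List.pyRange 0 ((a : Int) + 1) 1).map
          (fun i => PySem.List.pyGetD (PySem.List.pyGetD diff i []) 0 0)).sum
        = pvColSum diff (a + 1) := by
      have : ((a : Int) + 1) = ((a + 1 : Nat) : Int) := by push_cast; ring
      rw [this, PySem.List.pyRange_zero_natCast]
      simp [pvColSum, List.map_map, Function.comp_def, PySem.List.pyGetD_natCast,
        PySem.List.pyGetD_zero, List.getD]
    have hhead : (PySem.List.pyRange 0 (w : Int) 1).map (fun c =>
          ((PySem.List.pyRange 0 ((a : Int) + 1) 1).map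
              (fun i => PySem.List.pyGetD (PySem.List.pyGetD diff i []) 0 0)).sum
            + (PySem.List.slice row (some 1) (some (c + 1))).sum)
        = (pvColSum diff a + row.getD 0 0)
            :: pvScanRow (pvColSum diff a + row.getD 0 0) ((row.drop 1).take (w - 1)) := by
      have hS : pvColSum diff (a + 1) = pvColSum diff a + row.getD 0 0 := by
        simp [pvColSum, List.range_succ, h1, List.getD]
      rw [PySem.List.pyRange_zero_natCast, List.map_map]
      rw [pv_row_closed w hw (pvColSum diff a + row.getD 0 0) (row.drop 1) (by simp; omega)]
      apply List.map_congr_left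
      intro c _
      simp only [Function.comp]
      have h2 : ((c : Int) + 1) = ((c + 1 : Nat) : Int) := by push_cast; ring
      rw [h2, show (some (1 : Int)) = (some ((1 : Nat) : Int)) from rfl,
        PySem.List.slice_natCast, show c + 1 - 1 = c from by omega, hcol, hS]
    rw [hhead]
    rw [show ((a : Int) + 1) = ((a + 1 : Nat) : Int) from by push_cast; ring]
    rw [ih (a + 1) hdrop' (fun L hL => hlen L (by simp [hL]))]
    have hS : pvColSum diff (a + 1) = pvColSum diff a + row.getD 0 0 := by
      simp [pvColSum, List.range_succ, h1, List.getD]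
    rw [hS]
    rfl

theorem pv_B_eq (diff : List (List Int)) (hpre : Pre_restore_from_difference diff) :
    restore_from_difference_alt diff = pvSpecGo (diff.headD []).length 0 diff := by
  obtain ⟨hne, hw, hlen⟩ := hpre
  have h := pv_B_go diff (diff.headD []).length hw diff 0 rfl hlen
  rw [restore_from_difference_alt]
  simpa [pvColSum] using h

theorem pv_row_local (diff : List (List Int)) (r : Nat) (cols : List Nat) :
    ∀ (m : List (List Int)) (L : List Int), r < m.length →
    (cols.foldl (fun m col => pvSet2 m r col (pvGet2 m r (col - 1) + pvGet2 diff r col)) (m.set r L))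
      = m.set r (cols.foldl
          (fun L col => L.set col (L.getD (col - 1) 0 + (diff.getD r []).getD col 0)) L) := by
  induction cols with
  | nil => intro m L h; rfl
  | cons c cs ih =>
    intro m L h
    rw [List.foldl_cons, List.foldl_cons]
    have h1 : pvSet2 (m.set r L) r c (pvGet2 (m.set r L) r (c - 1) + pvGet2 diff r c)
        = m.set r (L.set c (L.getD (c - 1) 0 + (diff.getD r []).getD c 0)) := by
      simp [pvSet2, pvGet2, List.getD, h, List.set_set]
    rw [h1]; exact ih m _ h

theorem pv_fill_row (row : List Int) (D : List Int) : ∀ (pre T : List Int) (s : Int),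
    D.length ≤ T.length →
    (∀ j, j < D.length → row.getD (pre.length + 1 + j) 0 = D.getD j 0) →
    ((List.range' (pre.length + 1) D.length).foldl
      (fun L col => L.set col (L.getD (col - 1) 0 + row.getD col 0)) (pre ++ s :: T))
      = pre ++ s :: (pvScanRow s D ++ T.drop D.length) := by
  induction D with
  | nil => intro pre T s _ _; simp [pvScanRow]
  | cons d D' ih =>
    intro pre T s hlen h
    cases T with
    | nil => simp at hlen
    | cons t T' =>
      simp only [List.length_cons]
      rw [List.range'_succ, List.foldl_cons]
      have hget : (pre ++ s :: t :: T').getD (pre.length + 1 - 1) 0 = s := by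
        simpa using pv_getD_at_len pre (t :: T') s
      have hrow : row.getD (pre.length + 1) 0 = d := by
        have := h 0 (by simp); simpa using this
      have hset : (pre ++ s :: t :: T').set (pre.length + 1) (s + d)
          = (pre ++ [s]) ++ (s + d) :: T' := by
        have := pv_set_at_len (pre ++ [s]) T' t (s + d)
        simpa [List.append_assoc] using this
      rw [hget, hrow, hset]
      have hlen' : (pre ++ [s]).length + 1 = pre.length + 1 + 1 := by simp
      have ih' := ih (pre ++ [s]) T' (s + d) (by simpa using hlen)
        (fun j hj => by
          have := h (j + 1) (by simpa using hj)
          simpa [Nat.add_assoc, Nat.add_comm, Nat.add_left_comm] using this)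
      rw [hlen'] at ih'
      rw [ih']
      simp [pvScanRow, List.append_assoc]

theorem pv_col_fill (diff : List (List Int)) (rows : List (List Int)) :
    ∀ (pre : List (List Int)) (prevRow : List Int),
    (∀ L ∈ rows, L ≠ []) →
    ((List.range' (pre.length + 1) rows.length).foldl
      (fun m r => pvSet2 m r 0 (pvGet2 m (r - 1) 0 + pvGet2 diff r 0)) (pre ++ prevRow :: rows))
      = pre ++ prevRow :: pvColScan diff (prevRow.getD 0 0) (pre.length + 1) rows := by
  induction rows with
  | nil => intro pre prevRow _; simp [pvColScan]
  | cons L rest ih =>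
    intro pre prevRow hne
    simp only [List.length_cons]
    rw [List.range'_succ, List.foldl_cons]
    have e1 : (pre ++ prevRow :: L :: rest).getD (pre.length + 1 - 1) [] = prevRow := by
      rw [Nat.add_sub_cancel, pv_getD_at_len]
    have hgetL : (pre ++ prevRow :: L :: rest).getD (pre.length + 1) [] = L := by
      have h0 := pv_getD_at_len (pre ++ [prevRow]) rest L ([] : List Int)
      rw [pv_append_norm] at h0
      simpa using h0
    have hset : pvSet2 (pre ++ prevRow :: L :: rest) (pre.length + 1) 0
          (pvGet2 (pre ++ prevRow :: L :: rest) (pre.length + 1 - 1) 0 + pvGet2 diff (pre.length + 1) 0)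
        = (pre ++ [prevRow])
            ++ (L.set 0 (prevRow.getD 0 0 + (diff.getD (pre.length + 1) []).getD 0 0)) :: rest := by
      unfold pvSet2 pvGet2
      rw [e1, hgetL]
      have h1 := pv_set_at_len (pre ++ [prevRow]) rest L
        (L.set 0 (prevRow.getD 0 0 + (diff.getD (pre.length + 1) []).getD 0 0))
      rw [pv_append_norm] at h1
      simpa using h1
    rw [hset]
    have ih' := ih (pre ++ [prevRow])
      (L.set 0 (prevRow.getD 0 0 + (diff.getD (pre.length + 1) []).getD 0 0))
      (fun M hM => hne M (by simp [hM]))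
    have hlen2 : (pre ++ [prevRow]).length + 1 = pre.length + 1 + 1 := by simp
    rw [hlen2] at ih'
    rw [ih']
    have hhead : (L.set 0 (prevRow.getD 0 0 + (diff.getD (pre.length + 1) []).getD 0 0)).getD 0 0
        = prevRow.getD 0 0 + (diff.getD (pre.length + 1) []).getD 0 0 := by
      cases L with
      | nil => exact absurd rfl (hne [] (by simp))
      | cons a as => simp
    rw [hhead, pv_append_norm]
    simp [pvColScan]

theorem pv_rows_fill (w : Nat) (diff : List (List Int)) (rows : List (List Int)) :
    ∀ (pre : List (List Int)),
    ((List.range' pre.length rows.length).foldl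
      (fun m row => (List.range' 1 (w - 1)).foldl
        (fun m col => pvSet2 m row col (pvGet2 m row (col - 1) + pvGet2 diff row col)) m)
      (pre ++ rows))
      = pre ++ pvRowMap w diff pre.length rows := by
  induction rows with
  | nil => intro pre; simp [pvRowMap]
  | cons L rest ih =>
    intro pre
    simp only [List.length_cons]
    rw [List.range'_succ]
    simp only [List.foldl_cons]
    rw [show pre ++ L :: rest = (pre ++ L :: rest).set pre.length L from (pv_set_at_len pre rest L L).symm]
    rw [pv_row_local diff pre.length (List.range' 1 (w - 1)) (pre ++ L :: rest) L (by simp)]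
    rw [pv_set_at_len]
    have ih' := ih (pre ++ [pvRowFill w diff pre.length L])
    rw [pv_append_norm] at ih'
    have : (pre ++ [pvRowFill w diff pre.length L]).length = pre.length + 1 := by simp
    rw [this] at ih'
    rw [show (List.range' 1 (w - 1)).foldl
        (fun L col => L.set col (L.getD (col - 1) 0 + (diff.getD pre.length []).getD col 0)) L
        = pvRowFill w diff pre.length L from rfl]
    rw [ih', pv_append_norm]
    simp [pvRowMap]

theorem pv_chain (w : Nat) (diff : List (List Int)) (hw : 0 < w) (drest : List (List Int)) :
    ∀ (a : Nat) (s : Int), diff.drop a = drest → (∀ L ∈ drest, w ≤ L.length) →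
    pvRowMap w diff a (pvColScan diff s a (List.replicate drest.length (List.replicate w 0)))
      = pvSpecGo w s drest := by
  induction drest with
  | nil => intro a s _ _; simp [pvColScan, pvRowMap, pvSpecGo]
  | cons d drest' ih =>
    intro a s hdrop hlen
    have h1 : diff[a]? = some d := by
      rw [← List.head?_drop, hdrop]; rfl
    have hga : diff.getD a [] = d := by simp [List.getD, h1]
    have hdrop' : diff.drop (a + 1) = drest' := by
      have : diff.drop (a + 1) = (diff.drop a).drop 1 := by
        rw [List.drop_drop]
      rw [this, hdrop]; rfl
    have hd : w ≤ d.length := hlen d (by simp)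
    obtain ⟨k, hk⟩ : ∃ k, w = k + 1 := ⟨w - 1, by omega⟩
    simp only [List.length_cons, List.replicate_succ]
    simp only [pvColScan, pvRowMap, hga]
    -- the filled row
    have hzset : (List.replicate w (0:Int)).set 0 (s + d.getD 0 0)
        = (s + d.getD 0 0) :: List.replicate (w - 1) 0 := by
      rw [hk]; simp [List.replicate_succ]
    have hDlen : ((d.drop 1).take (w - 1)).length = w - 1 := by
      simp; omega
    have hfill : pvRowFill w diff a ((List.replicate w (0:Int)).set 0 (s + d.getD 0 0))
        = (s + d.getD 0 0) :: pvScanRow (s + d.getD 0 0) ((d.drop 1).take (w - 1)) := by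
      rw [hzset]
      unfold pvRowFill
      have h0 := pv_fill_row (diff.getD a []) ((d.drop 1).take (w - 1))
        [] (List.replicate (w - 1) 0) (s + d.getD 0 0)
        (by simp [hDlen])
        (fun j hj => by
          rw [hDlen] at hj
          have hj' : j + 1 < d.length := by omega
          simp [h1, List.getD, List.getElem?_take, List.getElem?_drop, hj,
            List.getElem?_eq_getElem hj', Nat.add_comm])
      simp only [List.length_nil, List.nil_append, hDlen] at h0
      rw [h0]
      simp [hDlen]
    rw [hfill]
    rw [ih (a + 1) (s + d.getD 0 0) hdrop' (fun L hL => hlen L (by simp [hL]))]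
    simp [pvSpecGo]

theorem pv_A_eq (diff : List (List Int)) (hpre : Pre_restore_from_difference diff) :
    restore_from_difference diff = pvSpecGo (diff.headD []).length 0 diff := by
  obtain ⟨hne, hw, hlen⟩ := hpre
  cases diff with
  | nil => exact absurd rfl hne
  | cons R0 rest =>
    simp only [List.headD_cons] at hw hlen ⊢
    obtain ⟨k, hk⟩ : ∃ k, R0.length = k + 1 := ⟨R0.length - 1, by omega⟩
    unfold restore_from_difference
    simp only [List.headD_cons, List.length_cons, Nat.add_sub_cancel]
    -- initial matrix
    rw [List.replicate_succ]
    -- step 1: restored[0][0] = diff[0][0]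
    have h1 : pvSet2 (List.replicate R0.length (0:Int) :: List.replicate rest.length (List.replicate R0.length (0:Int))) 0 0 (pvGet2 (R0 :: rest) 0 0)
        = (List.replicate R0.length (0:Int) :: List.replicate rest.length (List.replicate R0.length (0:Int))).set 0
            (R0.getD 0 0 :: List.replicate (R0.length - 1) (0:Int)) := by
      unfold pvSet2 pvGet2
      rw [hk]
      simp [List.replicate_succ, List.getD]
    rw [h1]
    -- step 2: first-row fold
    rw [pv_row_local (R0 :: rest) 0 (List.range' 1 (R0.length - 1)) _ _ (by simp)]
    have hD0len : ((R0.drop 1).take (R0.length - 1)).length = R0.length - 1 := by simp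
    have h2 := pv_fill_row ((R0 :: rest).getD 0 []) ((R0.drop 1).take (R0.length - 1))
      [] (List.replicate (R0.length - 1) 0) (R0.getD 0 0)
      (by simp [hD0len])
      (fun j hj => by
        rw [hD0len] at hj
        have hj' : j + 1 < R0.length := by omega
        simp [List.getD, List.getElem?_take, List.getElem?_drop, hj,
          List.getElem?_eq_getElem hj', Nat.add_comm])
    simp only [List.length_nil, List.nil_append, hD0len] at h2
    rw [h2]
    rw [show List.drop (R0.length - 1) (List.replicate (R0.length - 1) (0:Int)) = [] from by simp]
    rw [List.append_nil, List.set_cons_zero]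
    -- step 3: first-column fold
    have h3 := pv_col_fill (R0 :: rest) (List.replicate rest.length (List.replicate R0.length (0:Int)))
      [] (R0.getD 0 0 :: pvScanRow (R0.getD 0 0) (List.take (R0.length - 1) (List.drop 1 R0)))
      (fun L hL => by
        rw [List.eq_of_mem_replicate hL, hk]
        simp)
    simp only [List.length_nil, List.nil_append, List.length_replicate, Nat.zero_add,
      List.getD_cons_zero] at h3
    rw [h3]
    -- step 4: the nested fold, row-locally
    have h4 := pv_rows_fill R0.length (R0 :: rest)
      (pvColScan (R0 :: rest) (R0.getD 0 0) 1 (List.replicate rest.length (List.replicate R0.length (0:Int))))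
      [R0.getD 0 0 :: pvScanRow (R0.getD 0 0) (List.take (R0.length - 1) (List.drop 1 R0))]
    simp only [List.length_cons, List.length_nil, Nat.zero_add, pvColScan_length,
      List.length_replicate, List.cons_append, List.nil_append] at h4
    rw [h4]
    -- step 5: the chained closed form equals the spec
    rw [pv_chain R0.length (R0 :: rest) (by omega) rest 1 (R0.getD 0 0) rfl
      (fun L hL => hlen L (by simp [hL]))]
    simp [pvSpecGo]


-- ===== VERDICT (by name: the statement is the Claim_ definition above) =====
theorem restore_from_difference_spec : Claim_equal_restore_from_difference := by
  intro diff _ hpre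
  unfold Spec_restore_from_difference
  rw [pv_A_eq diff hpre, pv_B_eq diff hpre]
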